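-- pv_equiv track=rewrite | github.com/Yuming018/Generate_Tagging | combined extracted information/0_LLM_generate_question.py | judge_response
-- ===== SOURCE A (Python) =====
-- from collections import defaultdict
--
-- def judge_response(response, exampler):
--     judge = defaultdict(bool)
--     for line in response.split('\n'):
--         if 'Very Easy' in line:
--             judge['very easy'] = True
--         if 'Simple' in line :
--             judge['Simple'] = True
--         if 'Medium' in line:
--             judge['Medium'] = True
--         if 'Difficult' in line:
--             judge['Difficult'] = True
--     if len(response.split('\n')) >= (exampler+1)*4 and len(response.split('\n')) <= (exampler+2)*4:
--         judge['len'] = True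
--     return judge['very easy'] and judge['Simple'] and judge['Medium'] and judge['Difficult'] and judge['len']
-- ===== SOURCE B (Python) =====
-- def judge_response(response, exampler):
--     line_count = len(response.split('\n'))
--     return ('Very Easy' in response and 'Simple' in response
--             and 'Medium' in response and 'Difficult' in response
--             and (exampler + 1) * 4 <= line_count <= (exampler + 2) * 4)
-- ===== Notes on version B (the rewrite author's own statement) =====
-- stated objective: simpler
-- what changed: Dropped the per-line loop and the defaultdict accumulator: B tests the four difficulty labels by substring membership in the whole response (valid since none of them contains a newline) and checks the line-count bounds once with a chained comparison.
import Mathlib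
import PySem

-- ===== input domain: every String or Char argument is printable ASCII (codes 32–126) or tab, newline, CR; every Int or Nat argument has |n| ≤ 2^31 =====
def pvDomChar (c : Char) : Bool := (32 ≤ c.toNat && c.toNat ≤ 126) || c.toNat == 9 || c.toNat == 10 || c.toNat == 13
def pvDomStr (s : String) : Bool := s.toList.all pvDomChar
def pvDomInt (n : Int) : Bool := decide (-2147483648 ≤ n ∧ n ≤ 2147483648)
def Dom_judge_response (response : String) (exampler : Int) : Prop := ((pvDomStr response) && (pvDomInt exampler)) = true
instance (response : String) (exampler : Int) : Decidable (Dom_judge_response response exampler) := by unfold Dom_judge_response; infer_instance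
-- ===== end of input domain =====

-- B drops A's per-line loop and defaultdict: no difficulty label contains a newline, so membership in
-- some line equals membership in the whole response; the line-count bounds are checked once (simpler).

-- ===== PORT A =====
-- one loop iteration of A: the four 'if … in line' conditional dict updates
def jrStep (d : PySem.Dict String Bool) (line : List Char) : PySem.Dict String Bool :=
  let d := if PySem.Chars.isIn ("Very Easy".toList) line then d.insert "very easy" true else d
  let d := if PySem.Chars.isIn ("Simple".toList) line then d.insert "Simple" true else d
  let d := if PySem.Chars.isIn ("Medium".toList) line then d.insert "Medium" true else d
  let d := if PySem.Chars.isIn ("Difficult".toList) line then d.insert "Difficult" true else d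
  d

def judge_response (response : String) (exampler : Int) : Bool :=
  let lines := PySem.Chars.splitOn response.toList ['\n']
  let judge := lines.foldl jrStep PySem.Dict.empty
  let judge :=
    if (exampler + 1) * 4 ≤ (lines.length : Int) ∧ (lines.length : Int) ≤ (exampler + 2) * 4 then
      judge.insert "len" true
    else judge
  judge.getD "very easy" false && judge.getD "Simple" false && judge.getD "Medium" false
    && judge.getD "Difficult" false && judge.getD "len" false

-- ===== PORT B =====
def judge_response_alt (response : String) (exampler : Int) : Bool :=
  let line_count : Int := (PySem.Chars.splitOn response.toList ['\n']).length
  PySem.Str.isIn "Very Easy" response && PySem.Str.isIn "Simple" response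
    && PySem.Str.isIn "Medium" response && PySem.Str.isIn "Difficult" response
    && decide ((exampler + 1) * 4 ≤ line_count) && decide (line_count ≤ (exampler + 2) * 4)

-- ===== PRECONDITION & SPEC =====
def Spec_judge_response (response : String) (exampler : Int) (out : Bool) : Prop := out = judge_response_alt response exampler
instance (response : String) (exampler : Int) (out : Bool) : Decidable (Spec_judge_response response exampler out) := by unfold Spec_judge_response; infer_instance

-- ===== CLAIM (what is proved, stated in full; the proofs are below) =====
def Claim_equal_judge_response : Prop := ∀ (response : String) (exampler : Int), Dom_judge_response response exampler → Spec_judge_response response exampler (judge_response response exampler)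

-- ===== LEMMAS AND PROOFS =====

/-- Reference form of Python's `s.split(c)` for a single-character separator. -/
def splits (c : Char) : List Char → List (List Char)
  | [] => [[]]
  | x :: xs =>
    if x = c then [] :: splits c xs
    else (x :: (splits c xs).headD []) :: (splits c xs).tail

lemma splits_ne_nil (c : Char) (s : List Char) : splits c s ≠ [] := by
  cases s with
  | nil => simp [splits]
  | cons x xs => unfold splits; split <;> simp

lemma splits_exists_cons (c : Char) (s : List Char) : ∃ p ps, splits c s = p :: ps := by
  cases hxs : splits c s with
  | nil => exact absurd hxs (splits_ne_nil c s)
  | cons p ps => exact ⟨p, ps, rfl⟩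

lemma splits_cons_ne (c x : Char) (xs : List Char) (h : x ≠ c) :
    splits c (x :: xs) = (x :: (splits c xs).headD []) :: (splits c xs).tail := by
  simp [splits, h]

lemma splits_head (c : Char) (s : List Char) :
    (splits c s).headD [] = s.takeWhile (fun a => a ≠ c) := by
  induction s with
  | nil => simp [splits]
  | cons x xs ih =>
    by_cases h : x = c
    · subst h; simp [splits]
    · rw [splits_cons_ne c x xs h, List.takeWhile_cons_of_pos (by simpa using h)]
      simpa using ih

lemma go_eq (c : Char) :
    ∀ (fuel : Nat) (l cur : List Char) (acc : List (List Char)), l.length < fuel →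
      PySem.Chars.splitOn.go [c] fuel l cur acc =
        acc.reverse ++ (splits c l).modifyHead (fun p => cur.reverse ++ p) := by
  intro fuel
  induction fuel with
  | zero => intro l cur acc h; omega
  | succ n ihn =>
    intro l cur acc h
    cases l with
    | nil => simp [PySem.Chars.splitOn.go, splits]
    | cons x rest =>
      rw [PySem.Chars.splitOn.go]
      by_cases hx : x = c
      · subst hx
        rw [if_pos (by simp [List.isPrefixOf])]
        rw [ihn _ _ _ (by simpa using Nat.lt_of_succ_lt_succ h)]
        obtain ⟨p, ps, hps⟩ := splits_exists_cons x rest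
        simp [splits, hps]
      · rw [if_neg (by simp [List.isPrefixOf]; exact fun hh => hx hh.symm)]
        rw [ihn _ _ _ (by simpa using Nat.lt_of_succ_lt_succ h)]
        rw [splits_cons_ne c x rest hx]
        obtain ⟨p, ps, hps⟩ := splits_exists_cons c rest
        simp [hps]

lemma splitOn_eq_splits (c : Char) (s : List Char) :
    PySem.Chars.splitOn s [c] = splits c s := by
  rw [PySem.Chars.splitOn, go_eq c (s.length + 1) s [] [] (by omega)]
  obtain ⟨p, ps, hps⟩ := splits_exists_cons c s
  simp [hps]

lemma prefix_takeWhile {c : Char} :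
    ∀ (sub y : List Char), c ∉ sub → sub <+: y → sub <+: y.takeWhile (fun a => a ≠ c) := by
  intro sub
  induction sub with
  | nil => intro y _ _; exact List.nil_prefix
  | cons a t ih =>
    intro y hc hp
    cases y with
    | nil => exact absurd hp (by simp)
    | cons b ys =>
      rw [List.cons_prefix_cons] at hp
      obtain ⟨rfl, hp⟩ := hp
      have ha : a ≠ c := by intro h; exact hc (h ▸ List.mem_cons_self)
      rw [List.takeWhile_cons_of_pos (by simpa using ha), List.cons_prefix_cons]
      exact ⟨rfl, ih ys (fun h => hc (List.mem_cons_of_mem _ h)) hp⟩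

lemma not_prefix_of_head_mem {c : Char} {sub l : List Char} (hc : c ∉ sub) (hne : sub ≠ [])
    (h : sub <+: c :: l) : False := by
  cases sub with
  | nil => exact hne rfl
  | cons a t =>
    rw [List.cons_prefix_cons] at h
    exact hc (h.1 ▸ List.mem_cons_self)

/-- A newline-free, nonempty substring occurs in some line iff it occurs in the whole string. -/
lemma any_isIn_splits {c : Char} {sub : List Char} (hc : c ∉ sub) (hne : sub ≠ []) :
    ∀ s : List Char, (splits c s).any (fun l => PySem.Chars.isIn sub l) = PySem.Chars.isIn sub s := by
  intro s
  induction s with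
  | nil => simp [splits]
  | cons x xs ih =>
    rw [Bool.eq_iff_iff] at ih ⊢
    simp only [List.any_eq_true, PySem.Chars.isIn_iff_infix] at ih ⊢
    by_cases h : x = c
    · subst h
      have hs : splits x (x :: xs) = [] :: splits x xs := by simp [splits]
      rw [hs]
      constructor
      · rintro ⟨l, hl, hsub⟩
        rcases List.mem_cons.mp hl with rfl | hl
        · exact absurd (List.eq_nil_of_infix_nil hsub) hne
        · exact (List.infix_cons_iff).mpr (Or.inr (ih.mp ⟨l, hl, hsub⟩))
      · intro hsub
        rcases List.infix_cons_iff.mp hsub with hp | hi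
        · exact absurd hp (fun hp => not_prefix_of_head_mem hc hne hp)
        · obtain ⟨l, hl, hsub'⟩ := ih.mpr hi
          exact ⟨l, List.mem_cons_of_mem _ hl, hsub'⟩
    · obtain ⟨p, ps, hps⟩ := splits_exists_cons c xs
      have hp_take : p = xs.takeWhile (fun a => a ≠ c) := by
        have := splits_head c xs
        rw [hps] at this; simpa using this
      rw [splits_cons_ne c x xs h, hps]
      simp only [List.headD_cons, List.tail_cons]
      rw [hps] at ih
      constructor
      · rintro ⟨l, hl, hsub⟩
        rcases List.mem_cons.mp hl with rfl | hl
        · have hpre : (x :: p) <+: (x :: xs) := by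
            rw [List.cons_prefix_cons]
            exact ⟨rfl, hp_take ▸ List.takeWhile_prefix _⟩
          exact hsub.trans hpre.isInfix
        · exact List.infix_cons_iff.mpr (Or.inr (ih.mp ⟨l, List.mem_cons_of_mem _ hl, hsub⟩))
      · intro hsub
        rcases List.infix_cons_iff.mp hsub with hpf | hi
        · have : sub <+: (x :: xs).takeWhile (fun a => a ≠ c) := prefix_takeWhile sub _ hc hpf
          rw [List.takeWhile_cons_of_pos (by simpa using h)] at this
          exact ⟨x :: p, List.mem_cons_self, (hp_take ▸ this).isInfix⟩
        · rcases ih.mpr hi with ⟨l, hl, hsub'⟩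
          rcases List.mem_cons.mp hl with rfl | hl
          · exact ⟨x :: l, List.mem_cons_self, hsub'.trans (List.suffix_cons x l).isInfix⟩
          · exact ⟨l, List.mem_cons_of_mem _ hl, hsub'⟩

-- per-iteration effect of A's loop body on each of the five keys
lemma jrStep_getD_ve (d : PySem.Dict String Bool) (line : List Char) :
    (jrStep d line).getD "very easy" false
      = (d.getD "very easy" false || PySem.Chars.isIn ("Very Easy".toList) line) := by
  unfold jrStep; split_ifs <;> simp_all [PySem.Dict.getD_insert]

lemma jrStep_getD_si (d : PySem.Dict String Bool) (line : List Char) :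
    (jrStep d line).getD "Simple" false
      = (d.getD "Simple" false || PySem.Chars.isIn ("Simple".toList) line) := by
  unfold jrStep; split_ifs <;> simp_all [PySem.Dict.getD_insert]

lemma jrStep_getD_me (d : PySem.Dict String Bool) (line : List Char) :
    (jrStep d line).getD "Medium" false
      = (d.getD "Medium" false || PySem.Chars.isIn ("Medium".toList) line) := by
  unfold jrStep; split_ifs <;> simp_all [PySem.Dict.getD_insert]

lemma jrStep_getD_di (d : PySem.Dict String Bool) (line : List Char) :
    (jrStep d line).getD "Difficult" false
      = (d.getD "Difficult" false || PySem.Chars.isIn ("Difficult".toList) line) := by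
  unfold jrStep; split_ifs <;> simp_all [PySem.Dict.getD_insert]

lemma jrStep_getD_len (d : PySem.Dict String Bool) (line : List Char) :
    (jrStep d line).getD "len" false = d.getD "len" false := by
  unfold jrStep; split_ifs <;> simp_all [PySem.Dict.getD_insert]

-- the loop turns each key into 'any line matches'
lemma foldl_jrStep_getD (k : String) (pk : List Char → Bool)
    (hstep : ∀ d line, (jrStep d line).getD k false = (d.getD k false || pk line)) :
    ∀ (lines : List (List Char)) (d : PySem.Dict String Bool),
      (lines.foldl jrStep d).getD k false = (d.getD k false || lines.any pk) := by
  intro lines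
  induction lines with
  | nil => simp
  | cons l ls ih =>
    intro d
    rw [List.foldl_cons, ih, hstep, List.any_cons, Bool.or_assoc]

lemma getD_if_insert_len (d : PySem.Dict String Bool) (cond : Prop) [Decidable cond]
    (k : String) (hk : k ≠ "len") :
    ((if cond then d.insert "len" true else d).getD k false) = d.getD k false := by
  split_ifs with h
  · simp [PySem.Dict.getD_insert, hk]
  · rfl

-- ===== VERDICT (by name: the statement is the Claim_ definition above) =====
theorem judge_response_spec : Claim_equal_judge_response := by
  intro response exampler _
  unfold Spec_judge_response judge_response judge_response_alt
  set s := response.toList with hs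
  set lines := PySem.Chars.splitOn s ['\n'] with hlines
  have hsplits : lines = splits '\n' s := splitOn_eq_splits '\n' s
  have hany : ∀ sub : List Char, '\n' ∉ sub → sub ≠ [] →
      lines.any (fun l => PySem.Chars.isIn sub l) = PySem.Chars.isIn sub s := by
    intro sub hc hne
    rw [hsplits, any_isIn_splits hc hne s]
  have hfold : ∀ (k : String) (pk : List Char → Bool),
      (∀ d line, (jrStep d line).getD k false = (d.getD k false || pk line)) →
      ((lines.foldl jrStep PySem.Dict.empty).getD k false) = lines.any pk := by
    intro k pk hstep
    rw [foldl_jrStep_getD k pk hstep lines PySem.Dict.empty]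
    simp
  have hlen : ((lines.foldl jrStep PySem.Dict.empty).getD "len" false) = false := by
    rw [hfold "len" (fun _ => false) (fun d line => by rw [jrStep_getD_len]; simp)]
    simp
  simp only [getD_if_insert_len _ _ _ (by decide : ("very easy" : String) ≠ "len"),
             getD_if_insert_len _ _ _ (by decide : ("Simple" : String) ≠ "len"),
             getD_if_insert_len _ _ _ (by decide : ("Medium" : String) ≠ "len"),
             getD_if_insert_len _ _ _ (by decide : ("Difficult" : String) ≠ "len")]
  rw [hfold _ _ jrStep_getD_ve, hfold _ _ jrStep_getD_si, hfold _ _ jrStep_getD_me,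
      hfold _ _ jrStep_getD_di]
  rw [hany _ (by decide) (by decide), hany _ (by decide) (by decide),
      hany _ (by decide) (by decide), hany _ (by decide) (by decide)]
  have hlenbit : ((if (exampler + 1) * 4 ≤ (lines.length : Int) ∧ (lines.length : Int) ≤ (exampler + 2) * 4 then
        (lines.foldl jrStep PySem.Dict.empty).insert "len" true
      else lines.foldl jrStep PySem.Dict.empty).getD "len" false)
      = (decide ((exampler + 1) * 4 ≤ (lines.length : Int)) && decide ((lines.length : Int) ≤ (exampler + 2) * 4)) := by
    split_ifs with h
    · simp [h.1, h.2]
    · rw [hlen]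
      rcases Decidable.not_and_iff_not_or_not.mp h with h1 | h1 <;> simp [h1]
  rw [hlenbit]
  simp only [PySem.Str.isIn_eq]
  ac_rfl
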